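-- pv_equiv track=rewrite | github.com/saikumaresh/LearnByCoding | Data_Structures/Graphs/PathWithGoodNodes.py | solve
-- ===== SOURCE A (Python) =====
-- def dfs(graph, A, visited, C, curr, good_count, ans):
--     """
--     Depth First Search to traverse the graph and count valid leaf nodes.
--
--     :param graph: Adjacency list representation of the tree.
--     :param A: List indicating if a node is "good" (1) or not (0).
--     :param visited: List to track visited nodes.
--     :param C: Maximum allowed "good" nodes in a path.
--     :param curr: Current node being visited.
--     :param good_count: Remaining count of "good" nodes allowed on the path.
--     :param ans: List to store the count of valid leaf nodes.
--     """
--     if visited[curr]: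
--         return  # If the node is already visited, stop further exploration.
--
--     visited[curr] = True
--
--     # If the current node is "good", decrement the remaining good node count.
--     if A[curr] == 1:
--         good_count -= 1
--
--     # If the remaining good node count becomes negative, terminate the path.
--     if good_count < 0:
--         return
--
--     is_leaf = True  # Assume the current node is a leaf.
--
--     # Explore all neighbors of the current node.
--     for neighbor in graph[curr]:
--         if not visited[neighbor]:
--             is_leaf = False  # If there are unvisited neighbors, it's not a leaf.
--             dfs(graph, A, visited, C, neighbor, good_count, ans)
--
--     # If it's a leaf node, increment the valid leaf count.
--     if is_leaf:
--         ans[0] += 1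
--
-- def solve(A, B, C):
--     """
--     Solves the problem of counting valid leaf nodes in a tree.
--
--     :param A: List of integers (1 for "good", 0 for "not good").
--     :param B: List of edges in the tree (1-indexed).
--     :param C: Maximum allowed "good" nodes in a path.
--     :return: Number of valid leaf nodes.
--     """
--     n = len(A)
--
--     # Build the adjacency list for the graph (convert 1-indexed edges to 0-indexed).
--     graph = [[] for _ in range(n)]
--     for u, v in B:
--         graph[u - 1].append(v - 1)
--         graph[v - 1].append(u - 1)
--
--     visited = [False] * n  # To track visited nodes.
--     ans = [0]  # To count valid leaf nodes.
--
--     # Start DFS from the root node (0-indexed).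
--     dfs(graph, A, visited, C, 0, C, ans)
--
--     return ans[0]
-- ===== SOURCE B (Python) =====
-- def solve(A, B, C):
--     """Iterative DFS with an explicit stack of (node, good_budget, next_neighbor_index,
--     is_leaf) frames instead of recursion (also immune to Python's recursion limit)."""
--     n = len(A)
--     graph = [[] for _ in range(n)]
--     for u, v in B:
--         graph[u - 1].append(v - 1)
--         graph[v - 1].append(u - 1)
--     visited = [False] * n
--     ans = 0
--     stack = []
--     # enter the root
--     visited[0] = True
--     budget = C - 1 if A[0] == 1 else C
--     if budget >= 0:
--         stack.append((0, budget, 0, True))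
--     while stack:
--         node, budget, i, is_leaf = stack.pop()
--         nbrs = graph[node]
--         while i < len(nbrs) and visited[nbrs[i]]:
--             i += 1
--         if i == len(nbrs):
--             if is_leaf:
--                 ans += 1
--             continue
--         nb = nbrs[i]
--         stack.append((node, budget, i + 1, False))
--         visited[nb] = True
--         nbudget = budget - 1 if A[nb] == 1 else budget
--         if nbudget >= 0:
--             stack.append((nb, nbudget, 0, True))
--     return ans
-- ===== Notes on version B (the rewrite author's own statement) =====
-- stated objective: alternative
-- what changed: Replaces the recursive dfs helper (mutating a shared visited list and an ans cell) by an iterative DFS inside solve with an explicit stack of (node, remaining_good_budget, next_neighbour_index, is_leaf) frames, which also avoids Python's recursion limit on deep graphs.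
import Mathlib
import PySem

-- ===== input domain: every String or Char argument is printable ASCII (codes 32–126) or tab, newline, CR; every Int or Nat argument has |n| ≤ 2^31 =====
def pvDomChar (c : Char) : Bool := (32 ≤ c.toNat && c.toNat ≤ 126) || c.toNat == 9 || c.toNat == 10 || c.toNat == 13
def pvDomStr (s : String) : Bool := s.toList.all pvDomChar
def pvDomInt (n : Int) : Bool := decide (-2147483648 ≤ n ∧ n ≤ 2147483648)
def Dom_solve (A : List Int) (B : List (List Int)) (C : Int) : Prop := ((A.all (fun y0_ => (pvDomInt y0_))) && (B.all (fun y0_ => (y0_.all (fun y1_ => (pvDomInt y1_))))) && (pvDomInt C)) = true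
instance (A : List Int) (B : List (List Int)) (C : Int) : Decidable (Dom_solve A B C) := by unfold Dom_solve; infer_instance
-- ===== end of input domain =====

-- B replaces A's recursive dfs by an iterative DFS over an explicit stack of
-- (node, budget, next-neighbour-index, is_leaf) frames (alternative decomposition;
-- also immune to Python's recursion limit). Return-value equivalence only: A and B
-- both mutate only their own local lists.

-- ===== PORT A =====
/-- Python index normalisation (negative indices wrap); both Pythons build the graph
with the identical loop, so the helper is shared. Python stores the raw ints and wraps
them at every later list access; under `Pre_solve` normalising once at build time is
the same thing. -/
def pvNorm (n : Nat) (i : Int) : Nat := if i < 0 then (i + n).toNat else i.toNat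

def pvBuildGraph (n : Nat) (B : List (List Int)) : List (List Nat) :=
  B.foldl (fun g e =>
    match e with
    | [u, v] =>
      let ui := pvNorm n (u - 1)
      let vi := pvNorm n (v - 1)
      let g1 := g.set ui ((g.getD ui []) ++ [vi])
      g1.set vi ((g1.getD vi []) ++ [ui])
    | _ => g) (List.replicate n [])

mutual
/-- Port of A's `dfs` (the fuel and the in-range test on `curr` only make the
recursion total; inside `Pre_solve` they never cut a run short). -/
def dfsA (g : List (List Nat)) (A : List Int) (v : List Bool) (curr : Nat)
    (gc ans : Int) (fuel : Nat) : List Bool × Int :=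
  match fuel with
  | 0 => (v, ans)
  | f + 1 =>
    if curr < v.length then
      if v.getD curr false then (v, ans)
      else
        let v1 := v.set curr true
        let gc1 := if A.getD curr 0 = 1 then gc - 1 else gc
        if gc1 < 0 then (v1, ans)
        else
          let r := dfsLoopA g A v1 (g.getD curr []) gc1 ans true f
          (r.1, if r.2.2 then r.2.1 + 1 else r.2.1)
    else (v, ans)
  termination_by (fuel, 0)

/-- A's `for neighbor in graph[curr]` loop, threading (visited, ans, is_leaf). -/
def dfsLoopA (g : List (List Nat)) (A : List Int) (v : List Bool) (nbrs : List Nat)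
    (gc ans : Int) (leaf : Bool) (fuel : Nat) : List Bool × Int × Bool :=
  match nbrs with
  | [] => (v, ans, leaf)
  | nb :: rest =>
    if v.getD nb false then dfsLoopA g A v rest gc ans leaf fuel
    else
      let r := dfsA g A v nb gc ans fuel
      dfsLoopA g A r.1 rest gc r.2 false fuel
  termination_by (fuel, nbrs.length + 1)
end

def solve (A : List Int) (B : List (List Int)) (C : Int) : Int :=
  let n := A.length
  let g := pvBuildGraph n B
  let visited := List.replicate n false
  (dfsA g A visited 0 C 0 (n + 1)).2

-- ===== PORT B =====
/-- B's inner `while i < len(nbrs) and visited[nbrs[i]]: i += 1`. -/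
def skipVisited (v : List Bool) (nbrs : List Nat) (i : Nat) : Nat :=
  if i < nbrs.length then
    if v.getD (nbrs.getD i 0) false then skipVisited v nbrs (i + 1) else i
  else i
  termination_by nbrs.length - i

/-- B's `while stack:` loop (the fuel only makes it total; `solve_alt` passes enough). -/
def runB (g : List (List Nat)) (A : List Int) :
    List (Nat × Int × Nat × Bool) → List Bool → Int → Nat → Int
  | [], _, ans, _ => ans
  | _ :: _, _, ans, 0 => ans
  | (node, gc, i, leaf) :: stack, v, ans, f + 1 =>
    let nbrs := g.getD node []
    let j := skipVisited v nbrs i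
    if j < nbrs.length then
      let nb := nbrs.getD j 0
      let ngc := if A.getD nb 0 = 1 then gc - 1 else gc
      let stack2 := if 0 ≤ ngc then (nb, ngc, 0, true) :: (node, gc, j + 1, false) :: stack
                    else (node, gc, j + 1, false) :: stack
      runB g A stack2 (v.set nb true) ans f
    else
      runB g A stack v (if leaf then ans + 1 else ans) f

def solve_alt (A : List Int) (B : List (List Int)) (C : Int) : Int :=
  let n := A.length
  let g := pvBuildGraph n B
  if 0 < n then
    let v1 := (List.replicate n false).set 0 true
    let gc := if A.getD 0 0 = 1 then C - 1 else C
    let stack : List (Nat × Int × Nat × Bool) := if 0 ≤ gc then [(0, gc, 0, true)] else []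
    runB g A stack v1 0 ((n + 2) * ((g.map List.length).sum + 2))
  else 0

-- ===== PRECONDITION & SPEC =====
/-- Exactly the inputs on which the Python A returns: at least one node (else
`visited[0]` raises IndexError), every edge a 2-element list (else ValueError on
unpacking) whose endpoints are valid Python indices after the `-1` shift (else
IndexError); negative wrap-around indices stay admitted. -/
def Pre_solve (A : List Int) (B : List (List Int)) (C : Int) : Prop :=
  0 < A.length ∧ ∀ e ∈ B, e.length = 2 ∧
    ∀ x ∈ e, -(A.length : Int) ≤ x - 1 ∧ x - 1 < (A.length : Int)
instance (A : List Int) (B : List (List Int)) (C : Int) : Decidable (Pre_solve A B C) := by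
  unfold Pre_solve; infer_instance

def pvWitness_solve : List Int × List (List Int) × Int := ([1, 0, 1], [[1, 2], [1, 3]], 1)

def Spec_solve (A : List Int) (B : List (List Int)) (C : Int) (out : Int) : Prop := out = solve_alt A B C
instance (A : List Int) (B : List (List Int)) (C : Int) (out : Int) : Decidable (Spec_solve A B C out) := by unfold Spec_solve; infer_instance

-- ===== CLAIM (what is proved, stated in full; the proofs are below) =====
def Claim_equal_solve : Prop := ∀ (A : List Int) (B : List (List Int)) (C : Int), Dom_solve A B C → Pre_solve A B C → Spec_solve A B C (solve A B C)

-- ===== LEMMAS AND PROOFS =====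

lemma getElem_all_true (v : List Bool) (h : v.count false = 0) (i : Nat) (hi : i < v.length) :
    v[i] = true := by
  have : false ∉ v := by simpa using List.count_eq_zero.mp h
  cases hv : v[i] with
  | true => rfl
  | false => exact absurd (hv ▸ List.getElem_mem hi) this

lemma dfsA_all_visited (g : List (List Nat)) (A : List Int) (v : List Bool)
    (curr : Nat) (gc ans : Int) (f : Nat) (h : v.count false = 0) :
    dfsA g A v curr gc ans f = (v, ans) := by
  cases f with
  | zero => rw [dfsA]
  | succ f =>
    rw [dfsA]
    by_cases hc : curr < v.length
    · simp [hc, getElem_all_true v h curr hc]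
    · simp [hc]

lemma skip_ge (v : List Bool) (nbrs : List Nat) (i : Nat) : i ≤ skipVisited v nbrs i := by
  induction i using skipVisited.induct (v := v) (nbrs := nbrs) with
  | case1 i h hv ih => rw [skipVisited, if_pos h, if_pos hv]; omega
  | case2 i h hv => rw [skipVisited, if_pos h, if_neg hv]
  | case3 i h => rw [skipVisited, if_neg h]

lemma skip_le (v : List Bool) (nbrs : List Nat) (i : Nat) (h : i ≤ nbrs.length) :
    skipVisited v nbrs i ≤ nbrs.length := by
  induction i using skipVisited.induct (v := v) (nbrs := nbrs) with
  | case1 i h1 hv ih => rw [skipVisited, if_pos h1, if_pos hv]; exact ih (by omega)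
  | case2 i h1 hv => rw [skipVisited, if_pos h1, if_neg hv]; omega
  | case3 i h1 => rw [skipVisited, if_neg h1]; exact h

lemma skip_not_visited (v : List Bool) (nbrs : List Nat) (i : Nat)
    (h : skipVisited v nbrs i < nbrs.length) :
    v.getD (nbrs.getD (skipVisited v nbrs i) 0) false = false := by
  induction i using skipVisited.induct (v := v) (nbrs := nbrs) with
  | case1 i h1 hv ih => rw [skipVisited, if_pos h1, if_pos hv] at h ⊢; exact ih h
  | case2 i h1 hv => rw [skipVisited, if_pos h1, if_neg hv] at h ⊢; simpa using hv
  | case3 i h1 => rw [skipVisited, if_neg h1] at h; omega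

lemma skip_loop_eq (g : List (List Nat)) (A : List Int) (v : List Bool) (nbrs : List Nat)
    (gc ans : Int) (leaf : Bool) (f i : Nat) :
    dfsLoopA g A v (nbrs.drop i) gc ans leaf f
      = dfsLoopA g A v (nbrs.drop (skipVisited v nbrs i)) gc ans leaf f := by
  induction i using skipVisited.induct (v := v) (nbrs := nbrs) with
  | case1 i h1 hv ih =>
    rw [skipVisited, if_pos h1, if_pos hv]
    rw [← ih, List.drop_eq_getElem_cons h1, dfsLoopA]
    have hg : nbrs.getD i 0 = nbrs[i] := List.getD_eq_getElem nbrs 0 h1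
    rw [← hg, hv]; simp
  | case2 i h1 hv => rw [skipVisited, if_pos h1, if_neg hv]
  | case3 i h1 => rw [skipVisited, if_neg h1]
lemma count_false_set_le (v : List Bool) (i : Nat) :
    (v.set i true).count false ≤ v.count false := by
  induction v generalizing i with
  | nil => simp
  | cons b t ih =>
    cases i with
    | zero => cases b <;> simp
    | succ j => cases b <;> simp only [List.set_cons_succ, List.count_cons] <;> simp <;> exact ih j

lemma mono_both (g : List (List Nat)) (A : List Int) : ∀ f : Nat,
    (∀ v curr gc ans, ((dfsA g A v curr gc ans f).1).count false ≤ v.count false) ∧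
    (∀ v nbrs gc ans leaf, ((dfsLoopA g A v nbrs gc ans leaf f).1).count false ≤ v.count false) := by
  intro f
  induction f with
  | zero =>
    constructor
    · intro v curr gc ans; rw [dfsA]
    · intro v nbrs gc ans leaf
      induction nbrs generalizing ans leaf with
      | nil => rw [dfsLoopA]
      | cons nb rest ih =>
        rw [dfsLoopA]
        by_cases hv : v.getD nb false
        · rw [if_pos hv]; exact ih ans leaf
        · rw [if_neg hv]; rw [dfsA]; exact ih ans false
  | succ f ihf =>
    have hA : ∀ (v : List Bool) curr gc ans,
        ((dfsA g A v curr gc ans (f + 1)).1).count false ≤ v.count false := by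
      intro v curr gc ans
      rw [dfsA]
      by_cases hc : curr < v.length
      · rw [if_pos hc]
        by_cases hv : v.getD curr false
        · rw [if_pos hv]
        · rw [if_neg hv]
          by_cases hgc : (if A.getD curr 0 = 1 then gc - 1 else gc) < 0
          · rw [if_pos hgc]; exact count_false_set_le v curr
          · rw [if_neg hgc]
            exact le_trans (ihf.2 _ _ _ _ _) (count_false_set_le v curr)
      · rw [if_neg hc]
    refine ⟨hA, ?_⟩
    intro v nbrs gc ans leaf
    induction nbrs generalizing v ans leaf with
    | nil => rw [dfsLoopA]
    | cons nb rest ih =>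
      rw [dfsLoopA]
      by_cases hv : v.getD nb false
      · rw [if_pos hv]; exact ih v ans leaf
      · rw [if_neg hv]
        exact le_trans (ih _ _ _) (hA v nb gc ans)

lemma mono_A (g : List (List Nat)) (A : List Int) (v : List Bool) (curr : Nat)
    (gc ans : Int) (f : Nat) :
    ((dfsA g A v curr gc ans f).1).count false ≤ v.count false :=
  (mono_both g A f).1 v curr gc ans

lemma count_false_set (v : List Bool) (i : Nat) (h : i < v.length)
    (hf : v.getD i false = false) :
    (v.set i true).count false + 1 = v.count false := by
  induction v generalizing i with
  | nil => simp at h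
  | cons b t ih =>
    cases i with
    | zero => simp at hf; subst hf; simp
    | succ j =>
      simp at h hf
      cases b <;> simp only [List.set_cons_succ, List.count_cons] <;> simp <;> [skip; exact ih j h hf]
      · have := ih j h hf; omega

lemma fi_both (g : List (List Nat)) (A : List Int) : ∀ k f1 f2, f1 + f2 ≤ k →
    (∀ (v : List Bool) curr gc ans, v.count false ≤ f1 → v.count false ≤ f2 →
      dfsA g A v curr gc ans f1 = dfsA g A v curr gc ans f2) ∧
    (∀ (v : List Bool) nbrs gc ans leaf, v.count false ≤ f1 → v.count false ≤ f2 →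
      dfsLoopA g A v nbrs gc ans leaf f1 = dfsLoopA g A v nbrs gc ans leaf f2) := by
  intro k
  induction k with
  | zero =>
    intro f1 f2 hk
    have h1 : f1 = 0 := by omega
    have h2 : f2 = 0 := by omega
    subst h1; subst h2; exact ⟨fun _ _ _ _ _ _ => rfl, fun _ _ _ _ _ _ _ => rfl⟩
  | succ k ihk =>
    intro f1 f2 hk
    have hA : ∀ (v : List Bool) curr gc ans, v.count false ≤ f1 → v.count false ≤ f2 →
        dfsA g A v curr gc ans f1 = dfsA g A v curr gc ans f2 := by
      intro v curr gc ans h1 h2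
      by_cases hz : v.count false = 0
      · rw [dfsA_all_visited g A v curr gc ans f1 hz, dfsA_all_visited g A v curr gc ans f2 hz]
      · obtain ⟨f1', rfl⟩ : ∃ f1', f1 = f1' + 1 := ⟨f1 - 1, by omega⟩
        obtain ⟨f2', rfl⟩ : ∃ f2', f2 = f2' + 1 := ⟨f2 - 1, by omega⟩
        rw [dfsA, dfsA]
        by_cases hc : curr < v.length
        · rw [if_pos hc, if_pos hc]
          by_cases hv : v.getD curr false
          · rw [if_pos hv, if_pos hv]
          · rw [if_neg hv, if_neg hv]
            by_cases hgc : (if A.getD curr 0 = 1 then gc - 1 else gc) < 0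
            · rw [if_pos hgc, if_pos hgc]
            · rw [if_neg hgc, if_neg hgc]
              have hset : (v.set curr true).count false + 1 = v.count false :=
                count_false_set v curr hc (by simpa using hv)
              have := (ihk f1' f2' (by omega)).2 (v.set curr true) (g.getD curr [])
                (if A.getD curr 0 = 1 then gc - 1 else gc) ans true (by omega) (by omega)
              rw [this]
        · rw [if_neg hc, if_neg hc]
    refine ⟨hA, ?_⟩
    intro v nbrs gc ans leaf h1 h2
    induction nbrs generalizing v ans leaf with
    | nil => rw [dfsLoopA, dfsLoopA]
    | cons nb rest ih =>
      rw [dfsLoopA, dfsLoopA]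
      by_cases hv : v.getD nb false
      · rw [if_pos hv, if_pos hv]; exact ih v ans leaf h1 h2
      · rw [if_neg hv, if_neg hv]
        rw [hA v nb gc ans h1 h2]
        exact ih _ _ _ (le_trans (mono_A g A v nb gc ans f2) h1)
          (le_trans (mono_A g A v nb gc ans f2) h2)

lemma getD_mem_or {α : Type} (l : List α) (i : Nat) (d : α) : l.getD i d ∈ l ∨ l.getD i d = d := by
  by_cases h : i < l.length
  · left; rw [List.getD_eq_getElem l d h]; exact List.getElem_mem h
  · right; simp [List.getD_eq_getElem?_getD, List.getElem?_eq_none (by omega : l.length ≤ i)]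

lemma pvNorm_lt (n : Nat) (x : Int) (h1 : -(n : Int) ≤ x) (h2 : x < (n : Int)) :
    pvNorm n x < n := by
  unfold pvNorm; split <;> omega

lemma deg_le_sum (g : List (List Nat)) (node : Nat) :
    (g.getD node []).length ≤ (g.map List.length).sum := by
  rcases getD_mem_or g node [] with h | h
  · exact List.le_sum_of_mem (List.mem_map_of_mem h)
  · rw [h]; simp
lemma buildGraph_entries (n : Nat) (B : List (List Int))
    (hB : ∀ e ∈ B, e.length = 2 ∧ ∀ x ∈ e, -(n : Int) ≤ x - 1 ∧ x - 1 < (n : Int)) :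
    ∀ l ∈ pvBuildGraph n B, ∀ x ∈ l, x < n := by
  unfold pvBuildGraph
  suffices h : ∀ (g0 : List (List Nat)), (∀ l ∈ g0, ∀ x ∈ l, x < n) →
      ∀ l ∈ B.foldl (fun g e =>
        match e with
        | [u, v] =>
          let ui := pvNorm n (u - 1)
          let vi := pvNorm n (v - 1)
          let g1 := g.set ui ((g.getD ui []) ++ [vi])
          g1.set vi ((g1.getD vi []) ++ [ui])
        | _ => g) g0, ∀ x ∈ l, x < n by
    exact h (List.replicate n []) (by intro l hl; simp [List.eq_of_mem_replicate hl])
  induction B with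
  | nil => intro g0 hg0; simpa using hg0
  | cons e rest ih =>
    intro g0 hg0
    rw [List.foldl_cons]
    apply ih (fun e' he' => hB e' (by simp [he']))
    obtain ⟨hlen, hbnd⟩ := hB e (by simp)
    match e, hlen with
    | [u, v], _ =>
      simp only
      have hu := hbnd u (by simp)
      have hv := hbnd v (by simp)
      have hun : pvNorm n (u - 1) < n := pvNorm_lt n (u - 1) hu.1 hu.2
      have hvn : pvNorm n (v - 1) < n := pvNorm_lt n (v - 1) hv.1 hv.2
      intro l hl x hx
      -- membership through the two `set`s
      have step : ∀ (g : List (List Nat)) (i j : Nat), j < n → (∀ l' ∈ g, ∀ y ∈ l', y < n) →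
          ∀ l' ∈ g.set i ((g.getD i []) ++ [j]), ∀ y ∈ l', y < n := by
        intro g i j hj hg l' hl' y hy
        rcases List.mem_or_eq_of_mem_set hl' with h | h
        · exact hg l' h y hy
        · subst h
          rcases List.mem_append.mp hy with h | h
          · rcases getD_mem_or g i [] with hm | hm
            · exact hg _ hm y h
            · rw [hm] at h; simp at h
          · simp at h; omega
      exact step _ _ _ hun (step g0 _ _ hvn hg0) l hl x hx
lemma fi_A (g : List (List Nat)) (A : List Int) (v : List Bool) (curr : Nat)
    (gc ans : Int) (f1 f2 : Nat) (h1 : v.count false ≤ f1) (h2 : v.count false ≤ f2) :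
    dfsA g A v curr gc ans f1 = dfsA g A v curr gc ans f2 :=
  (fi_both g A (f1 + f2) f1 f2 le_rfl).1 v curr gc ans h1 h2

lemma fi_L (g : List (List Nat)) (A : List Int) (v : List Bool) (nbrs : List Nat)
    (gc ans : Int) (leaf : Bool) (f1 f2 : Nat) (h1 : v.count false ≤ f1) (h2 : v.count false ≤ f2) :
    dfsLoopA g A v nbrs gc ans leaf f1 = dfsLoopA g A v nbrs gc ans leaf f2 :=
  (fi_both g A (f1 + f2) f1 f2 le_rfl).2 v nbrs gc ans leaf h1 h2

def procFrame (g : List (List Nat)) (A : List Int) (fr : Nat × Int × Nat × Bool)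
    (v : List Bool) (ans : Int) : List Bool × Int :=
  ((dfsLoopA g A v ((g.getD fr.1 []).drop fr.2.2.1) fr.2.1 ans fr.2.2.2 (v.count false + 1)).1,
   if (dfsLoopA g A v ((g.getD fr.1 []).drop fr.2.2.1) fr.2.1 ans fr.2.2.2 (v.count false + 1)).2.2
   then (dfsLoopA g A v ((g.getD fr.1 []).drop fr.2.2.1) fr.2.1 ans fr.2.2.2 (v.count false + 1)).2.1 + 1
   else (dfsLoopA g A v ((g.getD fr.1 []).drop fr.2.2.1) fr.2.1 ans fr.2.2.2 (v.count false + 1)).2.1)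

def canonical (g : List (List Nat)) (A : List Int) :
    List (Nat × Int × Nat × Bool) → List Bool → Int → Int
  | [], _, ans => ans
  | fr :: stack, v, ans =>
    canonical g A stack (procFrame g A fr v ans).1 (procFrame g A fr v ans).2

lemma procFrame_end (g : List (List Nat)) (A : List Int) (node : Nat) (gc : Int)
    (i : Nat) (leaf : Bool) (v : List Bool) (ans : Int)
    (hend : ¬ skipVisited v (g.getD node []) i < (g.getD node []).length) :
    procFrame g A (node, gc, i, leaf) v ans = (v, if leaf then ans + 1 else ans) := by
  unfold procFrame
  simp only
  rw [skip_loop_eq, List.drop_of_length_le (by omega), dfsLoopA]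

lemma procFrame_step (g : List (List Nat)) (A : List Int) (node : Nat) (gc : Int)
    (i : Nat) (leaf : Bool) (v : List Bool) (ans : Int)
    (hlt : skipVisited v (g.getD node []) i < (g.getD node []).length) :
    procFrame g A (node, gc, i, leaf) v ans =
      procFrame g A (node, gc, skipVisited v (g.getD node []) i + 1, false)
        (dfsA g A v ((g.getD node []).getD (skipVisited v (g.getD node []) i) 0) gc ans
          (v.count false)).1
        (dfsA g A v ((g.getD node []).getD (skipVisited v (g.getD node []) i) 0) gc ans
          (v.count false)).2 := by
  set nbrs := g.getD node [] with hnbrs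
  set j := skipVisited v nbrs i with hj
  set nb := nbrs.getD j 0 with hnb
  have hunv : v.getD nb false = false := skip_not_visited v nbrs i hlt
  unfold procFrame
  simp only
  rw [skip_loop_eq, ← hj, List.drop_eq_getElem_cons hlt, dfsLoopA,
    ← List.getD_eq_getElem nbrs 0 hlt, ← hnb, hunv]
  simp only [Bool.false_eq_true, if_false]
  rw [fi_A g A v nb gc ans (v.count false + 1) (v.count false) (by omega) le_rfl]
  set r := dfsA g A v nb gc ans (v.count false) with hr
  rw [fi_L g A r.1 (nbrs.drop (j + 1)) gc r.2 false (v.count false + 1) (r.1.count false + 1)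
    (by have := mono_A g A v nb gc ans (v.count false); rw [← hr] at this; omega) (by omega)]

def wFrame (g : List (List Nat)) (fr : Nat × Int × Nat × Bool) : Nat :=
  (g.getD fr.1 []).length + 1 - fr.2.2.1

def phi (g : List (List Nat)) (stack : List (Nat × Int × Nat × Bool)) (v : List Bool) : Nat :=
  (stack.map (wFrame g)).sum + v.count false * ((g.map List.length).sum + 2)

lemma runB_eq_canonical (g : List (List Nat)) (A : List Int)
    (Hg : ∀ l ∈ g, ∀ x ∈ l, x < A.length) :
    ∀ (fuel : Nat) (stack : List (Nat × Int × Nat × Bool)) (v : List Bool) (ans : Int),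
      v.length = A.length →
      (∀ fr ∈ stack, fr.2.2.1 ≤ (g.getD fr.1 []).length) →
      phi g stack v < fuel →
      runB g A stack v ans fuel = canonical g A stack v ans := by
  intro fuel
  induction fuel with
  | zero => intro stack v ans _ _ hphi; omega
  | succ f ihf =>
    intro stack v ans hv hfr hphi
    match stack with
    | [] => rw [runB, canonical]
    | (node, gc, i, leaf) :: stack =>
      rw [runB]
      simp only
      set K := (g.map List.length).sum + 2 with hK
      set nbrs := g.getD node [] with hnbrs
      set j := skipVisited v nbrs i with hj
      have hil : i ≤ nbrs.length := hfr (node, gc, i, leaf) (by simp)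
      have hij : i ≤ j := skip_ge v nbrs i
      have hjl : j ≤ nbrs.length := skip_le v nbrs i hil
      have hdeg : nbrs.length ≤ (g.map List.length).sum := deg_le_sum g node
      have hphi' : phi g ((node, gc, i, leaf) :: stack) v
          = (List.map (wFrame g) stack).sum + (nbrs.length + 1 - i) + v.count false * K := by
        simp only [phi, List.map_cons, List.sum_cons, wFrame, ← hnbrs, ← hK]; try omega
      by_cases hlt : j < nbrs.length
      · rw [if_pos hlt]
        set nb := nbrs.getD j 0 with hnb
        have hnbA : nb < A.length := by
          have hmem : nb ∈ nbrs := by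
            rw [hnb]; rw [List.getD_eq_getElem nbrs 0 hlt]; exact List.getElem_mem hlt
          rcases getD_mem_or g node [] with hgm | hgm
          · exact Hg _ hgm nb (by rwa [← hnbrs])
          · rw [← hnbrs] at hgm; rw [hgm] at hmem; simp at hmem
        have hunv : v.getD nb false = false := skip_not_visited v nbrs i hlt
        have hset : (v.set nb true).count false + 1 = v.count false :=
          count_false_set v nb (by omega) hunv
        have hdegnb : (g.getD nb []).length ≤ (g.map List.length).sum := deg_le_sum g nb
        -- A's dfs entering nb, with fuel (v.count false)
        have hr : dfsA g A v nb gc ans (v.count false)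
            = (if (if A.getD nb 0 = 1 then gc - 1 else gc) < 0 then (v.set nb true, ans)
               else procFrame g A (nb, if A.getD nb 0 = 1 then gc - 1 else gc, 0, true)
                      (v.set nb true) ans) := by
          rw [show v.count false = (v.set nb true).count false + 1 from hset.symm, dfsA,
            if_pos (show nb < v.length by omega), hunv]
          simp only [Bool.false_eq_true, if_false]
          by_cases hneg : (if A.getD nb 0 = 1 then gc - 1 else gc) < 0
          · rw [if_pos hneg, if_pos hneg]
          · rw [if_neg hneg, if_neg hneg]
            unfold procFrame
            simp only [List.drop_zero]
            rw [fi_L g A (v.set nb true) (g.getD nb []) _ ans true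
              ((v.set nb true).count false) ((v.set nb true).count false + 1) le_rfl (by omega)]
        have hstep := procFrame_step g A node gc i leaf v ans (by rw [← hnbrs, ← hj]; exact hlt)
        rw [← hnbrs, ← hj, ← hnb] at hstep
        by_cases hgc : 0 ≤ (if A.getD nb 0 = 1 then gc - 1 else gc)
        · -- child pushed
          rw [if_pos hgc]
          have hrv : dfsA g A v nb gc ans (v.count false)
              = procFrame g A (nb, if A.getD nb 0 = 1 then gc - 1 else gc, 0, true)
                  (v.set nb true) ans := by rw [hr, if_neg (by omega)]
          rw [ihf _ _ ans (by simpa using hv)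
              (by
                intro fr hfr'
                simp only [List.mem_cons] at hfr'
                rcases hfr' with rfl | rfl | hfr'
                · exact Nat.zero_le _
                · show j + 1 ≤ nbrs.length; omega
                · exact hfr _ (List.mem_cons_of_mem _ hfr'))
              (by
                have h2 : phi g ((nb, if A.getD nb 0 = 1 then gc - 1 else gc, 0, true)
                    :: (node, gc, j + 1, false) :: stack) (v.set nb true)
                    = ((g.getD nb []).length + 1) + (nbrs.length + 1 - (j + 1))
                      + (List.map (wFrame g) stack).sum + (v.set nb true).count false * K := by
                  simp only [phi, List.map_cons, List.sum_cons, wFrame, ← hnbrs, ← hK]; try omega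
                have h3 : v.count false * K = (v.set nb true).count false * K + K := by
                  rw [← hset]; ring
                rw [h2]
                rw [hphi'] at hphi
                omega)]
          conv_lhs => rw [canonical, canonical]
          conv_rhs => rw [canonical]
          rw [← hrv, hstep]
        · -- child pruned
          rw [if_neg hgc]
          rw [ihf _ _ ans (by simpa using hv)
              (by
                intro fr hfr'
                simp only [List.mem_cons] at hfr'
                rcases hfr' with rfl | hfr'
                · show j + 1 ≤ nbrs.length; omega
                · exact hfr _ (List.mem_cons_of_mem _ hfr'))
              (by
                have h2 : phi g ((node, gc, j + 1, false) :: stack) (v.set nb true)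
                    = (nbrs.length + 1 - (j + 1)) + (List.map (wFrame g) stack).sum
                      + (v.set nb true).count false * K := by
                  simp only [phi, List.map_cons, List.sum_cons, wFrame, ← hnbrs, ← hK]; try omega
                have h3 : v.count false * K = (v.set nb true).count false * K + K := by
                  rw [← hset]; ring
                rw [h2]
                rw [hphi'] at hphi
                omega)]
          conv_lhs => rw [canonical]
          conv_rhs => rw [canonical]
          rw [hstep, hr, if_pos (by omega)]
      · rw [if_neg hlt]
        rw [ihf _ _ _ hv (fun fr hfr' => hfr _ (List.mem_cons_of_mem _ hfr'))
            (by
              have h4 : phi g stack v = (List.map (wFrame g) stack).sum + v.count false * K := by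
                simp only [phi, ← hK]
              rw [h4]; rw [hphi'] at hphi; omega)]
        conv_rhs => rw [canonical]
        rw [procFrame_end g A node gc i leaf v ans (by rw [← hnbrs, ← hj]; exact hlt)]
-- ===== VERDICT (by name: the statement is the Claim_ definition above) =====
theorem solve_spec : Claim_equal_solve := by
  intro A B C _ hpre
  obtain ⟨hA0, hB⟩ := hpre
  show solve A B C = solve_alt A B C
  simp only [solve, solve_alt]
  set n := A.length with hn
  set g := pvBuildGraph n B with hg
  have Hg : ∀ l ∈ g, ∀ x ∈ l, x < A.length := buildGraph_entries n B hB
  set v0 := List.replicate n false with hv0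
  have hlen0 : v0.length = n := by simp [hv0]
  have hcnt0 : v0.count false = n := by simp [hv0]
  have hget0 : v0.getD 0 false = false := by
    rw [hv0, List.getD_eq_getElem _ _ (by simpa using hA0)]; simp
  rw [dfsA, if_pos (show (0:Nat) < v0.length by omega), hget0]
  simp only [Bool.false_eq_true, if_false]
  set v1 := v0.set 0 true with hv1
  have hlen1 : v1.length = n := by rw [hv1]; simp [hv0]
  have hcnt1 : v1.count false + 1 = n := by
    rw [hv1, count_false_set v0 0 (by omega) hget0]; omega
  set gc1 := (if A.getD 0 0 = 1 then C - 1 else C) with hgc1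
  rw [if_pos (show 0 < n from hA0)]
  by_cases hneg : gc1 < 0
  · rw [if_pos hneg, if_neg (by omega : ¬ (0:Int) ≤ gc1), runB]
  · rw [if_neg hneg, if_pos (by omega : (0:Int) ≤ gc1)]
    set S := (g.map List.length).sum with hS
    have hdeg0 := deg_le_sum g 0
    rw [runB_eq_canonical g A Hg ((n + 2) * (S + 2)) [(0, gc1, 0, true)] v1 0
        (by omega)
        (by intro fr hfr; simp only [List.mem_cons] at hfr
            rcases hfr with rfl | hfr
            · exact Nat.zero_le _
            · simp at hfr)
        (by
          have hphi0 : phi g [(0, gc1, 0, true)] v1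
              = ((g.getD 0 []).length + 1) + v1.count false * (S + 2) := by
            simp only [phi, wFrame, List.map_cons, List.map_nil, List.sum_cons,
              List.sum_nil, ← hS]
            try omega
          have e1 : (n + 2) * (S + 2) = (n - 1) * (S + 2) + 3 * (S + 2) := by
            have h : n + 2 = (n - 1) + 3 := by omega
            rw [h, add_mul]
          have e2 : v1.count false * (S + 2) = (n - 1) * (S + 2) := by
            have h : v1.count false = n - 1 := by omega
            rw [h]
          rw [hphi0, e1, e2]
          omega)]
    conv_rhs => rw [canonical, canonical]
    unfold procFrame
    simp only [List.drop_zero]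
    rw [show v1.count false + 1 = n from hcnt1]
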